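-- pv_equiv track=rewrite | github.com/birukbelay/dsa-questions | a2sv-remote/contest/contest2/E.Wake-Him-Up.py | theorem
-- ===== SOURCE A (Python) =====
-- def theorem(time, lec, sleep):
--     tot=0
--     # calculating theorem count
--     for i in range(len(lec)):
--         if sleep[i]=="1":
--             tot+= int(lec[i])
--
--     maxTot=tot
--     temp=tot
--     l=0
--     for i in range(len(lec)):
--         if sleep[i]=='0':
--             temp += int(lec[i])
--         if i>=time:
--             if sleep[l]=='0':
--                 temp-= int(lec[l])
--             l+=1
--         maxTot= max(maxTot, temp)
--     return maxTot
-- ===== SOURCE B (Python) =====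
-- def theorem(time, lec, sleep):
--     # prefix-sum table + window scan instead of A's incremental add/remove bookkeeping
--     n = len(lec)
--     base = 0
--     P = [0]
--     for i in range(n):
--         if sleep[i] == '1':
--             base += int(lec[i])
--         P.append(P[-1] + (int(lec[i]) if sleep[i] == '0' else 0))
--     w = max(time, 0)
--     best = base
--     for i in range(n):
--         l = max(0, i - w + 1)
--         best = max(best, base + P[i + 1] - P[l])
--     return best
-- ===== Notes on version B (the rewrite author's own statement) =====
-- stated objective: alternative
-- what changed: Replaces A's incremental sliding-window bookkeeping (adding the entering element and subtracting the leaving one while tracking a moving left pointer) with a precomputed prefix-sum table of awake gains, from which each window sum is read off as P[i+1]-P[l] in a separate scan.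
import Mathlib
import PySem

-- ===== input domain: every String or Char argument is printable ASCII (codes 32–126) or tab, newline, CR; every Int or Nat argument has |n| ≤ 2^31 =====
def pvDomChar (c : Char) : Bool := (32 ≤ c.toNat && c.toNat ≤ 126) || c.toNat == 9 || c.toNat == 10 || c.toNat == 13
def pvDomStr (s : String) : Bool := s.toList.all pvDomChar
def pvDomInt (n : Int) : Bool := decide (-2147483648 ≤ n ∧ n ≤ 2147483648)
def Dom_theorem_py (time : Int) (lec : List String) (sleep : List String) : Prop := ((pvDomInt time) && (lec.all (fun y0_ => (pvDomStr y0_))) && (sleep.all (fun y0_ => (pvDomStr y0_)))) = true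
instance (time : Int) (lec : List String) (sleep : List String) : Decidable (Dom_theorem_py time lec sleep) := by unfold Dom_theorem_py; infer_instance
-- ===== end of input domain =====

-- B replaces A's incremental sliding-window add/remove bookkeeping with a prefix-sum table
-- scanned once per window end (objective: alternative decomposition, similar cost).

-- ===== PORT A =====
def theorem_py (time : Int) (lec : List String) (sleep : List String) : Int :=
  let tot := (PySem.List.pyRange 0 (lec.length : Int) 1).foldl
    (fun tot i =>
      if PySem.List.pyGetD sleep i "" = "1" then
        tot + (PySem.Int.ofStr? (PySem.List.pyGetD lec i "")).getD 0
      else tot) 0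
  let st := (PySem.List.pyRange 0 (lec.length : Int) 1).foldl
    (fun (st : Int × Int × Int) i =>
      let temp := if PySem.List.pyGetD sleep i "" = "0" then
          st.2.1 + (PySem.Int.ofStr? (PySem.List.pyGetD lec i "")).getD 0
        else st.2.1
      let tl := if time ≤ i then
          ((if PySem.List.pyGetD sleep st.2.2 "" = "0" then
              temp - (PySem.Int.ofStr? (PySem.List.pyGetD lec st.2.2 "")).getD 0
            else temp), st.2.2 + 1)
        else (temp, st.2.2)
      (max st.1 tl.1, tl.1, tl.2))
    (tot, tot, 0)
  st.1

-- ===== PORT B =====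
def theorem_py_alt (time : Int) (lec : List String) (sleep : List String) : Int :=
  let bp := (PySem.List.pyRange 0 (lec.length : Int) 1).foldl
    (fun (bp : Int × List Int) i =>
      ((if PySem.List.pyGetD sleep i "" = "1" then
          bp.1 + (PySem.Int.ofStr? (PySem.List.pyGetD lec i "")).getD 0
        else bp.1),
       bp.2 ++ [PySem.List.pyGetD bp.2 (-1) 0 +
         (if PySem.List.pyGetD sleep i "" = "0" then
            (PySem.Int.ofStr? (PySem.List.pyGetD lec i "")).getD 0
          else 0)]))
    (0, [0])
  let w := max time 0
  (PySem.List.pyRange 0 (lec.length : Int) 1).foldl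
    (fun best i =>
      let l := max 0 (i - w + 1)
      max best (bp.1 + PySem.List.pyGetD bp.2 (i + 1) 0 - PySem.List.pyGetD bp.2 l 0))
    bp.1

-- ===== PRECONDITION & SPEC =====
-- Pre_ excludes exactly the inputs where Python A raises: sleep shorter than lec (IndexError)
-- or a lecture count that is read (its sleep flag is "0" or "1") but does not parse as int (ValueError).
def Pre_theorem_py (time : Int) (lec : List String) (sleep : List String) : Prop :=
  lec.length ≤ sleep.length ∧
  ∀ i < lec.length, (sleep.getD i "" = "0" ∨ sleep.getD i "" = "1") →
    PySem.Int.ofStr? (lec.getD i "") ≠ none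
instance (time : Int) (lec : List String) (sleep : List String) : Decidable (Pre_theorem_py time lec sleep) := by unfold Pre_theorem_py; infer_instance

def pvWitness_theorem_py : Int × List String × List String := (2, ["3", "10", "4"], ["1", "0", "0"])

def Spec_theorem_py (time : Int) (lec : List String) (sleep : List String) (out : Int) : Prop := out = theorem_py_alt time lec sleep
instance (time : Int) (lec : List String) (sleep : List String) (out : Int) : Decidable (Spec_theorem_py time lec sleep out) := by unfold Spec_theorem_py; infer_instance

-- ===== CLAIM (what is proved, stated in full; the proofs are below) =====
def Claim_equal_theorem_py : Prop := ∀ (time : Int) (lec : List String) (sleep : List String), Dom_theorem_py time lec sleep → Pre_theorem_py time lec sleep → Spec_theorem_py time lec sleep (theorem_py time lec sleep)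

-- ===== LEMMAS AND PROOFS =====

-- value of int(lec[j]) as both ports totalize it
def vFn (lec : List String) (j : Nat) : Int := (PySem.Int.ofStr? (lec.getD j "")).getD 0
-- window gain of index j
def gFn (lec sleep : List String) (j : Nat) : Int := if sleep.getD j "" = "0" then vFn lec j else 0
-- prefix sums of the gains
def Pf (lec sleep : List String) : Nat → Int
  | 0 => 0
  | k + 1 => Pf lec sleep k + gFn lec sleep k
-- base theorems (sleeping-awake … the '1' positions) after k steps
def totF (lec sleep : List String) : Nat → Int
  | 0 => 0
  | k + 1 => totF lec sleep k + (if sleep.getD k "" = "1" then vFn lec k else 0)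
-- closed form of the running maximum after k window ends
def bestF (lec sleep : List String) (t : Nat) (tot : Int) : Nat → Int
  | 0 => tot
  | k + 1 => max (bestF lec sleep t tot k)
      (tot + Pf lec sleep (k + 1) - Pf lec sleep (k + 1 - t))

theorem totF_spec (lec sleep : List String) (k : Nat) :
    (List.range k).foldl
      (fun tot (i : Nat) =>
        if PySem.List.pyGetD sleep (i : Int) "" = "1" then
          tot + (PySem.Int.ofStr? (PySem.List.pyGetD lec (i : Int) "")).getD 0
        else tot) 0 = totF lec sleep k := by
  induction k with
  | zero => rfl
  | succ k ih =>
    rw [List.range_succ, List.foldl_append, ih]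
    simp [totF, vFn, PySem.List.pyGetD_natCast]
    split_ifs <;> simp

theorem bp_spec (lec sleep : List String) (k : Nat) :
    (List.range k).foldl
      (fun (bp : Int × List Int) (i : Nat) =>
        ((if PySem.List.pyGetD sleep (i : Int) "" = "1" then
            bp.1 + (PySem.Int.ofStr? (PySem.List.pyGetD lec (i : Int) "")).getD 0
          else bp.1),
         bp.2 ++ [PySem.List.pyGetD bp.2 (-1) 0 +
           (if PySem.List.pyGetD sleep (i : Int) "" = "0" then
              (PySem.Int.ofStr? (PySem.List.pyGetD lec (i : Int) "")).getD 0
            else 0)]))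
      (0, [0])
    = (totF lec sleep k, (List.range (k + 1)).map (Pf lec sleep)) := by
  induction k with
  | zero => rfl
  | succ k ih =>
    rw [List.range_succ, List.foldl_append, ih]
    have hsplit : (List.range (k + 1)).map (Pf lec sleep)
        = (List.range k).map (Pf lec sleep) ++ [Pf lec sleep k] := by
      rw [List.range_succ, List.map_append]; rfl
    simp only [List.foldl_cons, List.foldl_nil, hsplit,
      PySem.List.pyGetD_neg_one_append_singleton]
    rw [Prod.mk.injEq]
    refine ⟨?_, ?_⟩
    · simp [totF, vFn, PySem.List.pyGetD_natCast]; split_ifs <;> simp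
    · rw [List.range_succ (n := k + 1), List.map_append, List.map_singleton, hsplit]
      simp [List.append_assoc, Pf, gFn, vFn, PySem.List.pyGetD_natCast,
        List.getD_eq_getElem?_getD]

theorem pf_index (lec sleep : List String) (n l : Nat) (h : l ≤ n) :
    PySem.List.pyGetD ((List.range (n + 1)).map (Pf lec sleep)) (l : Int) 0
      = Pf lec sleep l := by
  rw [PySem.List.pyGetD_natCast]
  exact PySem.List.getD_map_range (Pf lec sleep) (n + 1) l 0 (by omega)

-- invariant of A's main loop: after k iterations the state is
-- (running max, tot + P k - P (k - t), k - t) with t = max(time,0)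
theorem stA_spec (time : Int) (lec sleep : List String) (k : Nat) :
    (List.range k).foldl
      (fun (st : Int × Int × Int) (i : Nat) =>
        let temp := if PySem.List.pyGetD sleep (i : Int) "" = "0" then
            st.2.1 + (PySem.Int.ofStr? (PySem.List.pyGetD lec (i : Int) "")).getD 0
          else st.2.1
        let tl := if time ≤ (i : Int) then
            ((if PySem.List.pyGetD sleep st.2.2 "" = "0" then
                temp - (PySem.Int.ofStr? (PySem.List.pyGetD lec st.2.2 "")).getD 0
              else temp), st.2.2 + 1)
          else (temp, st.2.2)
        (max st.1 tl.1, tl.1, tl.2))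
      (totF lec sleep lec.length, totF lec sleep lec.length, 0)
    = (bestF lec sleep time.toNat (totF lec sleep lec.length) k,
       totF lec sleep lec.length + Pf lec sleep k - Pf lec sleep (k - time.toNat),
       ((k - time.toNat : Nat) : Int)) := by
  induction k with
  | zero => simp [bestF, Pf]
  | succ k ih =>
    rw [List.range_succ, List.foldl_append, ih]
    simp only [List.foldl_cons, List.foldl_nil]
    by_cases ht : time.toNat ≤ k
    · rw [if_pos (show time ≤ (k : Int) by omega)]
      have hkk : k + 1 - time.toNat = (k - time.toNat) + 1 := by omega
      rw [Prod.mk.injEq, Prod.mk.injEq]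
      refine ⟨?_, ?_, ?_⟩
      · simp only [bestF, hkk, Pf, gFn, vFn, PySem.List.pyGetD_natCast]
        split_ifs <;> ring_nf
      · simp only [hkk, Pf, gFn, vFn, PySem.List.pyGetD_natCast]
        split_ifs <;> ring
      · omega
    · rw [if_neg (show ¬ time ≤ (k : Int) by omega)]
      have h0 : k - time.toNat = 0 := by omega
      have h1 : k + 1 - time.toNat = 0 := by omega
      rw [Prod.mk.injEq, Prod.mk.injEq]
      refine ⟨?_, ?_, ?_⟩
      · simp only [bestF, h0, h1, Pf, gFn, vFn, PySem.List.pyGetD_natCast]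
        split_ifs <;> ring_nf
      · simp only [h0, h1, Pf, gFn, vFn, PySem.List.pyGetD_natCast]
        split_ifs <;> ring
      · simp [h0, h1]

-- B's scan computes the same running maximum, for any table P agreeing with the prefix sums
theorem scan_spec (time : Int) (lec sleep : List String) (n : Nat) (P : List Int)
    (hP : ∀ l : Nat, l ≤ n → PySem.List.pyGetD P (l : Int) 0 = Pf lec sleep l)
    (k : Nat) (hk : k ≤ n) :
    (List.range k).foldl
      (fun best (i : Nat) =>
        let l := max 0 ((i : Int) - max time 0 + 1)
        max best (totF lec sleep n +
          PySem.List.pyGetD P ((i : Int) + 1) 0 - PySem.List.pyGetD P l 0))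
      (totF lec sleep n)
    = bestF lec sleep time.toNat (totF lec sleep n) k := by
  induction k with
  | zero => rfl
  | succ k ih =>
    rw [List.range_succ, List.foldl_append, ih (by omega)]
    simp only [List.foldl_cons, List.foldl_nil]
    have h1 : ((k : Int) + 1) = ((k + 1 : Nat) : Int) := by push_cast; ring
    have h2 : max 0 ((k : Int) - max time 0 + 1) = ((k + 1 - time.toNat : Nat) : Int) := by
      omega
    rw [h1, h2, hP (k + 1) (by omega), hP (k + 1 - time.toNat) (by omega)]
    simp [bestF]

-- ===== VERDICT (by name: the statement is the Claim_ definition above) =====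
theorem theorem_py_spec : Claim_equal_theorem_py := by
  intro time lec sleep _ _
  unfold Spec_theorem_py theorem_py theorem_py_alt
  simp only [PySem.List.pyRange_zero_nat, List.foldl_map]
  rw [totF_spec lec sleep lec.length, bp_spec lec sleep lec.length,
    stA_spec time lec sleep lec.length,
    scan_spec time lec sleep lec.length _
      (fun l hl => pf_index lec sleep lec.length l hl) lec.length le_rfl]
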